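-- pv_equiv track=rewrite | github.com/GPHemsley/pipenv | pipenv/cli.py | format_pip_output
-- ===== SOURCE A (Python) =====
-- def format_pip_output(out, r=None):
--     def gen(out):
--         for line in out.split('\n'):
--             # Remove requirements file information from pip output.
--             if '(from -r' in line:
--                 yield line[:line.index('(from -r')]
--             else:
--                 yield line
--
--     out = '\n'.join([l for l in gen(out)])
--     return out
-- ===== SOURCE B (Python) =====
-- def format_pip_output(out, r=None):
--     # Single character-level pass with a "skipping until end of line" state,
--     # instead of split / per-line substring search / join.
--     res = []
--     skipping = False
--     for i, c in enumerate(out):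
--         if c == '\n':
--             skipping = False
--             res.append(c)
--         elif not skipping and out.startswith('(from -r', i):
--             skipping = True
--         elif not skipping:
--             res.append(c)
--     return ''.join(res)
-- ===== Notes on version B (the rewrite author's own statement) =====
-- stated objective: alternative
-- what changed: Replaces the split-lines / per-line substring-search-and-truncate / join pipeline with a single character-level scan carrying a skip-until-newline state flag.
import Mathlib
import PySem

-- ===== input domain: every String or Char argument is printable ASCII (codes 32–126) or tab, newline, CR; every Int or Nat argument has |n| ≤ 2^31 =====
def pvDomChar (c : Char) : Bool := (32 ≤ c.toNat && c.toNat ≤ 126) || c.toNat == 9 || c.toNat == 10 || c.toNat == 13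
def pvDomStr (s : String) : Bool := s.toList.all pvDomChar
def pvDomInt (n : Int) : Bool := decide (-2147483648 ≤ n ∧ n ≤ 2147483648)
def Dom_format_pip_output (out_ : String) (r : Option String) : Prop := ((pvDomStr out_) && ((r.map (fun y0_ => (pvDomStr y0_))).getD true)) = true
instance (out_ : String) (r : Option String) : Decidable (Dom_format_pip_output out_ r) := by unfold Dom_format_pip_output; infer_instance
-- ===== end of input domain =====

-- B replaces A's split-lines / per-line search-and-truncate / join pipeline by a single
-- character-level scan with a skip-until-newline flag; same result, no speed claimed.

-- ===== PORT A =====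
-- out.split('\n'); per line: if '(from -r' in line: line[:line.index('(from -r')]; '\n'.join(...)
def format_pip_output (out_ : String) (r : Option String) : String :=
  match PySem.Str.split? out_ "\n" with
  | none => ""   -- unreachable: the separator "\n" is non-empty, so split? never returns none
  | some lines =>
    PySem.Str.join "\n" (lines.map (fun line =>
      if PySem.Str.isIn "(from -r" line then
        PySem.Str.slice line none (some (PySem.Str.find line "(from -r"))
      else line))

-- ===== PORT B =====
-- the marker '(from -r' as a character list
def pvMarker : List Char := ['(', 'f', 'r', 'o', 'm', ' ', '-', 'r']

-- B's loop: one pass over the characters; 'skipping' = currently dropping the rest of a line.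
-- out.startswith('(from -r', i) is 'pvMarker is a prefix of the remaining characters'.
def altLoop : List Char → Bool → List Char
  | [], _ => []
  | c :: rest, skipping =>
    if c = '\n' then c :: altLoop rest false
    else if !skipping && List.isPrefixOf pvMarker (c :: rest) then altLoop rest true
    else if !skipping then c :: altLoop rest false
    else altLoop rest true

def format_pip_output_alt (out_ : String) (r : Option String) : String :=
  String.ofList (altLoop out_.toList false)

-- ===== PRECONDITION & SPEC =====
def Spec_format_pip_output (out_ : String) (r : Option String) (out : String) : Prop := out = format_pip_output_alt out_ r
instance (out_ : String) (r : Option String) (out : String) : Decidable (Spec_format_pip_output out_ r out) := by unfold Spec_format_pip_output; infer_instance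

-- ===== CLAIM (what is proved, stated in full; the proofs are below) =====
def Claim_equal_format_pip_output : Prop := ∀ (out_ : String) (r : Option String), Dom_format_pip_output out_ r → Spec_format_pip_output out_ r (format_pip_output out_ r)

-- ===== LEMMAS AND PROOFS =====

-- A's per-line truncation, on the List Char side
def truncC (line : List Char) : List Char :=
  if PySem.Chars.isIn pvMarker line then
    PySem.List.slice line none (some (PySem.Chars.find line pvMarker))
  else line

-- a simple structural model of out.split('\n')
def splitNl : List Char → List (List Char)
  | [] => [[]]
  | c :: rest =>
    if c = '\n' then [] :: splitNl rest
    else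
      match splitNl rest with
      | [] => [[c]]
      | h :: t => (c :: h) :: t

theorem splitNl_ne_nil (l : List Char) : splitNl l ≠ [] := by
  induction l with
  | nil => simp [splitNl]
  | cons c rest ih =>
    simp only [splitNl]
    split
    · simp
    · rcases hs : splitNl rest with _ | ⟨h, t⟩ <;> simp [hs]

theorem splitNl_head (l : List Char) (h : List Char) (t : List (List Char))
    (hs : splitNl l = h :: t) : h = l.takeWhile (fun c => !(c = '\n')) := by
  induction l generalizing h t with
  | nil => simp [splitNl] at hs; simp [hs.1]
  | cons c rest ih =>
    by_cases hc : c = '\n'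
    · simp [splitNl, hc] at hs
      simp [hc, hs.1, List.takeWhile]
    · rcases hr : splitNl rest with _ | ⟨h', t'⟩
      · exact absurd hr (splitNl_ne_nil rest)
      · simp only [splitNl, if_neg hc, hr] at hs
        have h2 := ih h' t' hr
        cases hs
        simp [List.takeWhile, hc, h2]

theorem go_eq (fuel : Nat) (l cur : List Char) (acc : List (List Char))
    (hf : l.length < fuel) :
    PySem.Chars.splitOn.go ['\n'] fuel l cur acc
      = acc.reverse ++ (splitNl l).modifyHead (cur.reverse ++ ·) := by
  induction fuel generalizing l cur acc with
  | zero => omega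
  | succ n ih =>
    cases l with
    | nil => simp [PySem.Chars.splitOn.go, splitNl]
    | cons c rest =>
      by_cases hc : c = '\n'
      · have hpre : List.isPrefixOf ['\n'] (c :: rest) = true := by simp [List.isPrefixOf, hc]
        rw [PySem.Chars.splitOn.go]
        simp only [hpre, if_pos]
        rw [ih _ _ _ (by simp at hf ⊢; omega)]
        simp only [splitNl, hc, if_pos rfl]
        rcases hr : splitNl rest with _ | ⟨h', t'⟩
        · exact absurd hr (splitNl_ne_nil rest)
        · simp [hr]
      · have hpre : List.isPrefixOf ['\n'] (c :: rest) = false := by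
          simp [List.isPrefixOf]; exact fun h => hc h.symm
        rw [PySem.Chars.splitOn.go]
        simp only [hpre, Bool.false_eq_true, if_false]
        rw [ih _ _ _ (by simp at hf ⊢; omega)]
        rcases hr : splitNl rest with _ | ⟨h', t'⟩
        · exact absurd hr (splitNl_ne_nil rest)
        · simp [splitNl, hc, hr]

theorem splitOn_eq (l : List Char) : PySem.Chars.splitOn l ['\n'] = splitNl l := by
  rw [PySem.Chars.splitOn, go_eq _ _ _ _ (Nat.lt_succ_self _)]
  rcases hr : splitNl l with _ | ⟨h', t'⟩
  · exact absurd hr (splitNl_ne_nil l)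
  · simp

theorem prefix_takeWhile {p : Char → Bool} (m l : List Char)
    (hm : ∀ c ∈ m, p c = true) (hp : m <+: l) : m <+: l.takeWhile p := by
  induction m generalizing l with
  | nil => simp
  | cons a m' ih =>
    rcases l with _ | ⟨b, l'⟩
    · simp at hp
    · rcases List.cons_prefix_cons.mp hp with ⟨rfl, hp'⟩
      have ha : p a = true := hm a (by simp)
      rw [List.takeWhile_cons, ha]
      simp only [if_pos rfl]
      exact List.cons_prefix_cons.mpr ⟨rfl, ih l' (fun c hc => hm c (by simp [hc])) hp'⟩

theorem find_eq_of_spec (s m : List Char) (k : Nat) (h1 : m <+: s.drop k)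
    (h2 : ∀ i < k, ¬ m <+: s.drop i) : PySem.Chars.find s m = (k : Int) := by
  have hin : m <:+: s := h1.isInfix.trans (List.drop_suffix k s).isInfix
  have hf0 : 0 ≤ PySem.Chars.find s m := (PySem.Chars.find_nonneg_iff s m).mpr hin
  obtain ⟨hpre, hmin⟩ := PySem.Chars.find_spec hf0
  have hle : (PySem.Chars.find s m).toNat ≤ k := by
    by_contra hgt
    exact hmin k (by omega) h1
  have hge : k ≤ (PySem.Chars.find s m).toNat := by
    by_contra hgt
    exact h2 _ (by omega) hpre
  omega

theorem truncC_of_prefix (line : List Char) (h : pvMarker <+: line) : truncC line = [] := by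
  have hin : PySem.Chars.isIn pvMarker line = true :=
    (PySem.Chars.isIn_iff_infix _ _).mpr h.isInfix
  have hf : PySem.Chars.find line pvMarker = ((0 : Nat) : Int) :=
    find_eq_of_spec line pvMarker 0 (by simpa using h) (by omega)
  rw [truncC, if_pos hin, hf, PySem.List.slice_to _ (by omega)]
  simp

theorem truncC_cons (c : Char) (h : List Char) (hp : ¬ pvMarker <+: (c :: h)) :
    truncC (c :: h) = c :: truncC h := by
  by_cases hin : PySem.Chars.isIn pvMarker h = true
  · have hinf : pvMarker <:+: h := (PySem.Chars.isIn_iff_infix _ _).mp hin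
    have hf0 : 0 ≤ PySem.Chars.find h pvMarker := (PySem.Chars.find_nonneg_iff _ _).mpr hinf
    obtain ⟨hpre, hmin⟩ := PySem.Chars.find_spec hf0
    set f : Nat := (PySem.Chars.find h pvMarker).toNat with hfdef
    have hfc : PySem.Chars.find (c :: h) pvMarker = ((f + 1 : Nat) : Int) := by
      apply find_eq_of_spec
      · simpa using hpre
      · intro i hi
        rcases i with _ | j
        · simpa using hp
        · simpa using hmin j (by omega)
    have hin2 : PySem.Chars.isIn pvMarker (c :: h) = true :=
      (PySem.Chars.isIn_iff_infix _ _).mpr (hinf.trans (List.suffix_cons c h).isInfix)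
    rw [truncC, truncC, if_pos hin, if_pos hin2, hfc,
      PySem.List.slice_to _ (by omega), PySem.List.slice_to _ hf0]
    simp only [Int.toNat_natCast, List.take_succ_cons, hfdef]
  · rw [Bool.not_eq_true] at hin
    have hin2 : PySem.Chars.isIn pvMarker (c :: h) = false := by
      rw [PySem.Chars.isIn_eq_false_iff]
      rw [PySem.Chars.isIn_eq_false_iff] at hin
      intro hinf
      rcases List.infix_cons_iff.mp hinf with h1 | h2
      · exact hp h1
      · exact hin h2
    rw [truncC, truncC, hin2, hin]
    simp

theorem truncC_nil : truncC [] = [] := by decide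

theorem altLoop_eq (l : List Char) :
    altLoop l false = PySem.Chars.join ['\n'] ((splitNl l).map truncC)
    ∧ altLoop l true = PySem.Chars.join ['\n'] ([] :: ((splitNl l).tail.map truncC)) := by
  induction l with
  | nil =>
    constructor <;> simp [altLoop, splitNl, truncC_nil, PySem.Chars.join_singleton]
  | cons c rest ih =>
    obtain ⟨ih0, ih1⟩ := ih
    rcases hr : splitNl rest with _ | ⟨h, t⟩
    · exact absurd hr (splitNl_ne_nil rest)
    by_cases hc : c = '\n'
    · subst hc
      have hsp : splitNl ('\n' :: rest) = [] :: h :: t := by simp [splitNl, hr]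
      constructor
      · show '\n' :: altLoop rest false = _
        rw [ih0, hsp]
        simp only [List.map_cons, truncC_nil, PySem.Chars.join_cons_cons, hr]
        simp
      · show '\n' :: altLoop rest false = _
        rw [ih0, hsp]
        simp only [List.tail_cons, List.map_cons, PySem.Chars.join_cons_cons, hr]
        simp
    · have hsp : splitNl (c :: rest) = (c :: h) :: t := by simp [splitNl, hc, hr]
      have hhead : h = rest.takeWhile (fun x => !(x = '\n')) := splitNl_head rest h t hr
      have hchtw : c :: h = (c :: rest).takeWhile (fun x => !(x = '\n')) := by
        rw [List.takeWhile_cons]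
        simp [hc, hhead]
      have haltT : altLoop (c :: rest) true = altLoop rest true := by
        simp only [altLoop, if_neg hc, Bool.not_true, Bool.false_and,
          Bool.false_eq_true, if_false]
      constructor
      · by_cases hm : List.isPrefixOf pvMarker (c :: rest) = true
        · have halt : altLoop (c :: rest) false = altLoop rest true := by
            simp only [altLoop, if_neg hc, Bool.not_false, Bool.true_and, hm, if_pos]
          have hmp : pvMarker <+: (c :: rest) := List.isPrefixOf_iff_prefix.mp hm
          have hmk : pvMarker <+: (c :: h) := by
            rw [hchtw]
            exact prefix_takeWhile _ _
              (by intro x hx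
                  simp only [pvMarker, List.mem_cons, List.not_mem_nil, or_false] at hx
                  rcases hx with rfl | rfl | rfl | rfl | rfl | rfl | rfl | rfl <;> rfl) hmp
          rw [halt, ih1, hsp, hr]
          simp only [List.map_cons, List.tail_cons, truncC_of_prefix _ hmk]
        · have halt : altLoop (c :: rest) false = c :: altLoop rest false := by
            simp only [altLoop, if_neg hc, Bool.not_false, Bool.true_and,
              Bool.not_eq_true] at *
            simp only [hm, Bool.false_eq_true, if_false, if_pos]
          have hnp : ¬ pvMarker <+: (c :: h) := by
            intro hpre
            exact hm (List.isPrefixOf_iff_prefix.mpr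
              (hpre.trans (by rw [hchtw]; exact List.takeWhile_prefix _)))
          rw [halt, ih0, hsp, hr, List.map_cons, List.map_cons, truncC_cons c h hnp]
          rcases t with _ | ⟨u, t'⟩
          · simp [PySem.Chars.join_singleton]
          · simp only [List.map_cons, PySem.Chars.join_cons_cons]
            simp
      · rw [haltT, ih1, hsp, hr]
        simp only [List.tail_cons]

theorem marker_toList : "(from -r".toList = pvMarker := by rfl

theorem toList_A (out_ : String) (r : Option String) :
    (format_pip_output out_ r).toList
      = PySem.Chars.join ['\n'] ((PySem.Chars.splitOn out_.toList ['\n']).map truncC) := by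
  have hsep : PySem.Str.split? out_ "\n" = some ((PySem.Chars.splitOn out_.toList ['\n']).map String.ofList) := by
    rw [PySem.Str.split?, PySem.Chars.split?]
    rfl
  rw [format_pip_output, hsep]
  rw [PySem.Str.toList_join, List.map_map, List.map_map]
  show PySem.Chars.join "\n".toList _ = _
  congr 1
  apply List.map_congr_left
  intro p _
  simp only [Function.comp_apply]
  by_cases hin : PySem.Chars.isIn pvMarker p = true
  · rw [if_pos (by simpa [PySem.Str.isIn, marker_toList] using hin)]
    rw [truncC, if_pos hin]
    rw [PySem.Str.toList_slice]
    simp [PySem.Str.find, PySem.Chars.slice_eq_listSlice, marker_toList]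
  · rw [if_neg (by simp [PySem.Str.isIn, marker_toList, hin])]
    rw [truncC, if_neg hin]
    simp

-- ===== VERDICT (by name: the statement is the Claim_ definition above) =====
theorem format_pip_output_spec : Claim_equal_format_pip_output := by
  intro out_ r _
  unfold Spec_format_pip_output
  rw [← String.toList_inj, toList_A, splitOn_eq, ← (altLoop_eq out_.toList).1,
    format_pip_output_alt, String.toList_ofList]
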